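-- pv_equiv track=rewrite | github.com/3mkr/MIMUW-IO | app.py | sort_both_arrays_based_on_first_array
-- ===== SOURCE A (Python) =====
-- def sort_both_arrays_based_on_first_array(keys, values):
--     indices = [i for i in range(len(keys))]
--     def key_fun(i):
--         return keys[i]
--     order = sorted(indices, key=key_fun)
--     out_keys = [keys[i] for i in order]
--     out_values = [values[i] for i in order]
--     return out_keys, out_values
-- ===== SOURCE B (Python) =====
-- def sort_both_arrays_based_on_first_array(keys, values):
--     out_keys = []
--     out_values = []
--     for i in range(len(keys)):
--         k = keys[i]
--         v = values[i]
--         j = 0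
--         while j < len(out_keys) and out_keys[j] <= k:
--             j += 1
--         out_keys.insert(j, k)
--         out_values.insert(j, v)
--     return out_keys, out_values
-- ===== Notes on version B (the rewrite author's own statement) =====
-- stated objective: alternative
-- what changed: B replaces A's sort of an index permutation plus two gather passes by a single online stable insertion sort: it scans the inputs once and inserts each key and its value in place into two parallel sorted output lists (inserting after equal keys, so ties keep original order), never building an index list or calling sorted().
import Mathlib
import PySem

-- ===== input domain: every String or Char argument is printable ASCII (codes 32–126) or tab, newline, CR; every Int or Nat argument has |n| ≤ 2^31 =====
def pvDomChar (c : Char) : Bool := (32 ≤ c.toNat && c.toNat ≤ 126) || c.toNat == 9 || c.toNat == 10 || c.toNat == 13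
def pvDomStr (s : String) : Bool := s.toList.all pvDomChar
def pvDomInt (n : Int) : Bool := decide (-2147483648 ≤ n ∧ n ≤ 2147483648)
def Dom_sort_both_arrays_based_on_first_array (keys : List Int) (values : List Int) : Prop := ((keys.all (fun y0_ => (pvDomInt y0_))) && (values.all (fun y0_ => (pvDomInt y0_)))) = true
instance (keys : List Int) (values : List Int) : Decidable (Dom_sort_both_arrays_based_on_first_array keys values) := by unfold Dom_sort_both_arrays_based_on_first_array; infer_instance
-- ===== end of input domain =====

-- B is an online stable insertion sort threading two parallel output lists (insert after equal
-- keys), instead of A's sorted index permutation followed by two gather passes (alternative algorithm).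
-- A and B raise IndexError when values is shorter than keys; Pre_ excludes exactly those inputs.


-- ===== PORT A =====
def sort_both_arrays_based_on_first_array (keys : List Int) (values : List Int) : List Int × List Int :=
  let indices : List Int := PySem.List.pyRange 0 (keys.length : Int) 1
  let key_fun : Int → Int := fun i => PySem.List.pyGetD keys i 0
  let order := PySem.List.sorted indices key_fun
  let out_keys := order.map (fun i => PySem.List.pyGetD keys i 0)
  let out_values := order.map (fun i => PySem.List.pyGetD values i 0)
  (out_keys, out_values)

-- ===== PORT B =====
-- B's inner while loop + two inserts: walk the two sorted accumulators in step, past every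
-- stored key ≤ k, and put k and v there (stable: equal keys keep original order).
def pvInsert2 (k v : Int) : List Int → List Int → List Int × List Int
  | k' :: ks, v' :: vs =>
      if k' ≤ k then
        let r := pvInsert2 k v ks vs
        (k' :: r.1, v' :: r.2)
      else (k :: k' :: ks, v :: v' :: vs)
  | ks, vs => (k :: ks, v :: vs)

def sort_both_arrays_based_on_first_array_alt (keys : List Int) (values : List Int) : List Int × List Int :=
  (PySem.List.pyRange 0 (keys.length : Int) 1).foldl
    (fun acc i =>
      pvInsert2 (PySem.List.pyGetD keys i 0) (PySem.List.pyGetD values i 0) acc.1 acc.2)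
    ([], [])

-- ===== PRECONDITION & SPEC =====
-- A (and B) raise IndexError when values is shorter than keys; exactly those inputs are excluded.
def Pre_sort_both_arrays_based_on_first_array (keys : List Int) (values : List Int) : Prop :=
  keys.length ≤ values.length
instance (keys : List Int) (values : List Int) : Decidable (Pre_sort_both_arrays_based_on_first_array keys values) := by unfold Pre_sort_both_arrays_based_on_first_array; infer_instance

def pvWitness_sort_both_arrays_based_on_first_array : List Int × List Int := ([3, 1, 2], [10, 20, 30])

def Spec_sort_both_arrays_based_on_first_array (keys : List Int) (values : List Int) (out : List Int × List Int) : Prop := out = sort_both_arrays_based_on_first_array_alt keys values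
instance (keys : List Int) (values : List Int) (out : List Int × List Int) : Decidable (Spec_sort_both_arrays_based_on_first_array keys values out) := by unfold Spec_sort_both_arrays_based_on_first_array; infer_instance

-- ===== CLAIM (what is proved, stated in full; the proofs are below) =====
def Claim_equal_sort_both_arrays_based_on_first_array : Prop := ∀ (keys : List Int) (values : List Int), Dom_sort_both_arrays_based_on_first_array keys values → Pre_sort_both_arrays_based_on_first_array keys values → Spec_sort_both_arrays_based_on_first_array keys values (sort_both_arrays_based_on_first_array keys values)

-- ===== LEMMAS AND PROOFS =====

-- insertBy commutes with map when the comparison is transported along the map.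
lemma insertBy_map {α β : Type} (g : α → β) (ba : α → α → Bool) (bb : β → β → Bool)
    (h : ∀ a b, bb (g a) (g b) = ba a b) (x : α) :
    ∀ (ys : List α), PySem.List.insertBy bb (g x) (ys.map g) = (PySem.List.insertBy ba x ys).map g := by
  intro ys
  induction ys with
  | nil => simp [PySem.List.insertBy]
  | cons y ys ih =>
    simp only [List.map_cons, PySem.List.insertBy, h]
    by_cases hb : ba x y
    · simp [hb]
    · simp [hb, ih]

-- The stable sort of a mapped list with the transported key is the map of the stable sort.
lemma sorted_map_transport {α β : Type} (g : α → β) (kb : β → Int) (xs : List α) :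
    PySem.List.sorted (xs.map g) kb = (PySem.List.sorted xs (fun a => kb (g a))).map g := by
  rw [PySem.List.sorted_eq_foldl_insertBy, PySem.List.sorted_eq_foldl_insertBy]
  have : ∀ (acc : List α),
      (xs.map g).foldl (fun acc x => PySem.List.insertBy (fun a b => decide (kb a < kb b)) x acc) (acc.map g)
        = (xs.foldl (fun acc x => PySem.List.insertBy (fun a b => decide (kb (g a) < kb (g b))) x acc) acc).map g := by
    induction xs with
    | nil => intro acc; simp
    | cons x xs ih =>
      intro acc
      simp only [List.map_cons, List.foldl_cons]
      rw [insertBy_map g (fun a b => decide (kb (g a) < kb (g b))) (fun a b => decide (kb a < kb b)) (fun _ _ => rfl)]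
      exact ih _
  simpa using this []

-- B's parallel insertion equals insertBy on the zipped pair list, componentwise.
lemma pvInsert2_eq_insertBy (k v : Int) :
    ∀ (ps : List (Int × Int)),
      pvInsert2 k v (ps.map Prod.fst) (ps.map Prod.snd)
        = ((PySem.List.insertBy (fun a b => decide (a.1 < b.1)) (k, v) ps).map Prod.fst,
           (PySem.List.insertBy (fun a b => decide (a.1 < b.1)) (k, v) ps).map Prod.snd) := by
  intro ps
  induction ps with
  | nil => simp [pvInsert2, PySem.List.insertBy]
  | cons p ps ih =>
    simp only [List.map_cons, pvInsert2, PySem.List.insertBy]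
    by_cases h : p.1 ≤ k
    · have h' : ¬ (k < p.1) := not_lt.mpr h
      simp [h, h', ih]
    · have h' : k < p.1 := not_le.mp h
      simp [h, h']

-- B's fold over indices tracks the componentwise image of the insertBy fold over pairs.
lemma foldl_pvInsert2 (keys values : List Int) :
    ∀ (is : List Int) (ps : List (Int × Int)),
      is.foldl
        (fun acc i =>
          pvInsert2 (PySem.List.pyGetD keys i 0) (PySem.List.pyGetD values i 0) acc.1 acc.2)
        (ps.map Prod.fst, ps.map Prod.snd)
      = ((is.foldl
            (fun acc i =>
              PySem.List.insertBy (fun a b => decide (a.1 < b.1))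
                (PySem.List.pyGetD keys i 0, PySem.List.pyGetD values i 0) acc)
            ps).map Prod.fst,
         (is.foldl
            (fun acc i =>
              PySem.List.insertBy (fun a b => decide (a.1 < b.1))
                (PySem.List.pyGetD keys i 0, PySem.List.pyGetD values i 0) acc)
            ps).map Prod.snd) := by
  intro is
  induction is with
  | nil => intro ps; rfl
  | cons i is ih =>
    intro ps
    simp only [List.foldl_cons]
    rw [pvInsert2_eq_insertBy]
    exact ih _

theorem sort_both_arrays_based_on_first_array_spec_aux (keys values : List Int) :
    sort_both_arrays_based_on_first_array keys values = sort_both_arrays_based_on_first_array_alt keys values := by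
  unfold sort_both_arrays_based_on_first_array sort_both_arrays_based_on_first_array_alt
  simp only
  have hB := foldl_pvInsert2 keys values (PySem.List.pyRange 0 (keys.length : Int) 1) []
  simp only [List.map_nil] at hB
  rw [hB]
  have hA := sorted_map_transport
      (fun i => (PySem.List.pyGetD keys i 0, PySem.List.pyGetD values i 0))
      (fun p : Int × Int => p.1) (PySem.List.pyRange 0 (keys.length : Int) 1)
  rw [PySem.List.sorted_eq_foldl_insertBy] at hA
  have : ((PySem.List.pyRange 0 (keys.length : Int) 1).map
        (fun i => (PySem.List.pyGetD keys i 0, PySem.List.pyGetD values i 0))).foldl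
      (fun acc x => PySem.List.insertBy (fun a b => decide (a.1 < b.1)) x acc) []
      = (PySem.List.pyRange 0 (keys.length : Int) 1).foldl
          (fun acc i =>
            PySem.List.insertBy (fun a b => decide (a.1 < b.1))
              (PySem.List.pyGetD keys i 0, PySem.List.pyGetD values i 0) acc) [] := by
    rw [List.foldl_map]
  rw [this] at hA
  rw [hA]
  simp [List.map_map, Function.comp]

-- ===== VERDICT (by name: the statement is the Claim_ definition above) =====
theorem sort_both_arrays_based_on_first_array_spec : Claim_equal_sort_both_arrays_based_on_first_array := by
  intro keys values _ _
  exact sort_both_arrays_based_on_first_array_spec_aux keys values
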